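-- pv_equiv track=rewrite | github.com/ArduPilot/ardupilot | libraries/AP_HAL_ChibiOS/hwdef/scripts/bdshot_encoder.py | rll_encode
-- ===== SOURCE A (Python) =====
-- def rll_encode(value):
--     old_bit = 0
--     rll_value = 0
--
--     for i in range(1, 21):
--         if value & 1:
--             new_bit = (1 ^ old_bit)
--         else:
--             new_bit = old_bit
--         value >>= 1
--         rll_value |= new_bit << i
--         old_bit = new_bit
--     return rll_value
-- ===== SOURCE B (Python) =====
-- def rll_encode(value):
--     x = value & 0xFFFFF
--     x ^= x << 1
--     x ^= x << 2
--     x ^= x << 4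
--     x ^= x << 8
--     x ^= x << 16
--     return (x & 0xFFFFF) << 1
-- ===== Notes on version B (the rewrite author's own statement) =====
-- stated objective: alternative
-- what changed: Replaces the sequential per-bit parity-tracking loop with a branch-free closed-form bit expression: mask to the low twenty bits, apply the standard prefix-XOR shift cascade (x ^= x<<1; x ^= x<<2; x ^= x<<4; x ^= x<<8; x ^= x<<16), mask again, shift left by one.
import Mathlib
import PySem

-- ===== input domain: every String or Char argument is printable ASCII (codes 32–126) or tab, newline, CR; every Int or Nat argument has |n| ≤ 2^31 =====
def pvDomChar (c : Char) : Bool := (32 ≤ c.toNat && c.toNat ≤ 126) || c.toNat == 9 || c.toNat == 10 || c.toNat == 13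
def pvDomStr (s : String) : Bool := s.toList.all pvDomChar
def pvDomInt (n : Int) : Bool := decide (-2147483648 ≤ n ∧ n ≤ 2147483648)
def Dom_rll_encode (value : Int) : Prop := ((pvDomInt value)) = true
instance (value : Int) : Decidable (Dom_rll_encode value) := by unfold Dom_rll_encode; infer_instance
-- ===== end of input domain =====

-- B replaces A's sequential per-bit parity loop by a fixed prefix-XOR shift cascade
-- on the masked low bits of the value (objective: alternative closed-form bit expression).

-- ===== PORT A =====
def rll_encode (value : Int) : Int :=
  let s := (PySem.List.pyRange 1 21).foldl
    (fun (st : Int × Int × Int) (i : Int) =>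
      let old_bit := st.1
      let rll_value := st.2.1
      let value := st.2.2
      let new_bit := if PySem.Int.band value 1 = 1 then PySem.Int.bxor 1 old_bit else old_bit
      let value := value >>> (1 : Nat)
      let rll_value := PySem.Int.bor rll_value (new_bit <<< i.toNat)
      (new_bit, rll_value, value))
    (0, 0, value)
  s.2.1

-- ===== PORT B =====
def rll_encode_alt (value : Int) : Int :=
  let x := PySem.Int.band value 0xFFFFF
  let x := PySem.Int.bxor x (x <<< (1 : Nat))
  let x := PySem.Int.bxor x (x <<< (2 : Nat))
  let x := PySem.Int.bxor x (x <<< (4 : Nat))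
  let x := PySem.Int.bxor x (x <<< (8 : Nat))
  let x := PySem.Int.bxor x (x <<< (16 : Nat))
  (PySem.Int.band x 0xFFFFF) <<< (1 : Nat)

-- ===== PRECONDITION & SPEC =====
def Spec_rll_encode (value : Int) (out : Int) : Prop := out = rll_encode_alt value
instance (value : Int) (out : Int) : Decidable (Spec_rll_encode value out) := by unfold Spec_rll_encode; infer_instance

-- ===== CLAIM (what is proved, stated in full; the proofs are below) =====
def Claim_equal_rll_encode : Prop := ∀ (value : Int), Dom_rll_encode value → Spec_rll_encode value (rll_encode value)

-- ===== LEMMAS AND PROOFS =====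

-- parity (XOR) of the bits lo, lo+1, …, lo+len-1 of m
def pvPw (m : Nat) (lo : Nat) : Nat → Bool
  | 0 => false
  | len + 1 => xor (m.testBit lo) (pvPw m (lo + 1) len)

lemma pvPw_add (m : Nat) : ∀ (a : Nat) (lo b : Nat),
    pvPw m lo (a + b) = xor (pvPw m lo a) (pvPw m (lo + a) b) := by
  intro a
  induction a with
  | zero => intro lo b; simp [pvPw]
  | succ a ih =>
    intro lo b
    have h1 : a + 1 + b = (a + b) + 1 := by omega
    rw [h1]
    show xor (m.testBit lo) (pvPw m (lo + 1) (a + b)) = _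
    rw [ih (lo + 1) b]
    have h2 : lo + 1 + a = lo + (a + 1) := by omega
    rw [h2]
    show _ = xor (xor (m.testBit lo) (pvPw m (lo + 1) a)) (pvPw m (lo + (a + 1)) b)
    rw [Bool.xor_assoc]

lemma pvPw_one (m lo : Nat) : pvPw m lo 1 = m.testBit lo := by simp [pvPw]

-- window invariant of the xor-shift cascade
def pvWin (m k x : Nat) : Prop := ∀ i, x.testBit i = pvPw m (i + 1 - k) (min k (i + 1))

lemma pvWin_one (m : Nat) : pvWin m 1 m := by
  intro i
  have h1 : min 1 (i + 1) = 1 := by omega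
  have h2 : i + 1 - 1 = i := by omega
  rw [h1, h2, pvPw_one]

lemma pvWin_step (m k x : Nat) (_hk : 0 < k) (h : pvWin m k x) :
    pvWin m (2 * k) (x ^^^ (x <<< k)) := by
  intro i
  rw [Nat.testBit_xor, Nat.testBit_shiftLeft, h i]
  by_cases hik : k ≤ i
  · have hd : decide (i ≥ k) = true := by simp [hik]
    rw [hd, Bool.true_and, h (i - k)]
    by_cases h2 : 2 * k ≤ i + 1
    · have e1 : min k (i + 1) = k := by omega
      have e2 : min k (i - k + 1) = k := by omega
      have e3 : i - k + 1 - k = i + 1 - 2 * k := by omega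
      have e4 : min (2 * k) (i + 1) = 2 * k := by omega
      rw [e1, e2, e3, e4]
      have e5 : 2 * k = k + k := by omega
      rw [e5, pvPw_add m k (i + 1 - (k + k)) k]
      have e6 : i + 1 - (k + k) + k = i + 1 - k := by omega
      rw [e6]
      exact Bool.xor_comm _ _
    · have e1 : min k (i + 1) = k := by omega
      have e2 : min k (i - k + 1) = i - k + 1 := by omega
      have e3 : i - k + 1 - k = 0 := by omega
      have e4 : min (2 * k) (i + 1) = i + 1 := by omega
      have e5 : i + 1 - 2 * k = 0 := by omega
      rw [e1, e2, e3, e4, e5]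
      have e8 : i - k + 1 = i + 1 - k := by omega
      rw [e8]
      have hsplit : pvPw m 0 (i + 1) = xor (pvPw m 0 (i + 1 - k)) (pvPw m (i + 1 - k) k) := by
        conv_lhs => rw [show i + 1 = (i + 1 - k) + k from by omega]
        rw [pvPw_add m (i + 1 - k) 0 k, show 0 + (i + 1 - k) = i + 1 - k from by omega]
      rw [hsplit]
      exact Bool.xor_comm _ _
  · have hd : decide (i ≥ k) = false := by simp [hik]
    rw [hd, Bool.false_and, Bool.xor_false]
    have e1 : i + 1 - k = 0 := by omega
    have e2 : i + 1 - 2 * k = 0 := by omega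
    have e3 : min k (i + 1) = i + 1 := by omega
    have e4 : min (2 * k) (i + 1) = i + 1 := by omega
    rw [e1, e2, e3, e4]

-- the Nat-level cascade (shape of B's computation after the mask)
def pvCascade (n : Nat) : Nat :=
  let x := n ^^^ (n <<< 1)
  let x := x ^^^ (x <<< 2)
  let x := x ^^^ (x <<< 4)
  let x := x ^^^ (x <<< 8)
  x ^^^ (x <<< 16)

lemma pvCascade_win (n : Nat) : pvWin n 32 (pvCascade n) := by
  have h1 := pvWin_one n
  have h2 := pvWin_step n 1 n (by omega) h1
  have h4 := pvWin_step n 2 _ (by omega) h2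
  have h8 := pvWin_step n 4 _ (by omega) h4
  have h16 := pvWin_step n 8 _ (by omega) h8
  have h32 := pvWin_step n 16 _ (by omega) h16
  norm_num at h32
  exact h32

lemma pvCascade_testBit (n i : Nat) (hi : i < 20) :
    (pvCascade n).testBit i = pvPw n 0 (i + 1) := by
  have h := pvCascade_win n i
  have e1 : i + 1 - 32 = 0 := by omega
  have e2 : min 32 (i + 1) = i + 1 := by omega
  rw [h, e1, e2]

-- A's accumulated rll_value after k iterations, at the Nat level
def pvRA (n : Nat) : Nat → Nat
  | 0 => 0
  | k + 1 => pvRA n k ||| ((if pvPw n 0 (k + 1) then 1 else 0) <<< (k + 1))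

lemma pvRA_testBit (n : Nat) : ∀ (k j : Nat),
    (pvRA n k).testBit j = (decide (1 ≤ j) && decide (j ≤ k) && pvPw n 0 j) := by
  intro k
  induction k with
  | zero => intro j; simp [pvRA]; omega
  | succ k ih =>
    intro j
    rw [pvRA, Nat.testBit_or, ih j, Nat.testBit_shiftLeft]
    by_cases hj : j = k + 1
    · subst hj
      have hd : decide (k + 1 ≥ k + 1) = true := by simp
      rw [hd, Bool.true_and, show k + 1 - (k + 1) = 0 from by omega]
      have d1 : decide (1 ≤ k + 1) = true := by simp
      have d2 : decide (k + 1 ≤ k) = false := by simp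
      have d3 : decide (k + 1 ≤ k + 1) = true := by simp
      rw [d1, d2]
      rcases hp : pvPw n 0 (k + 1) with _ | _ <;> simp
    · by_cases hlt : j < k + 1
      · have hd : decide (j ≥ k + 1) = false := by simp; omega
        rw [hd, Bool.false_and, Bool.or_false]
        have : (decide (j ≤ k)) = (decide (j ≤ k + 1)) := by
          simp; omega
        rw [this]
      · have hd : decide (j ≥ k + 1) = true := by simp; omega
        rw [hd, Bool.true_and]
        have e1 : decide (j ≤ k) = false := by simp; omega
        have e2 : decide (j ≤ k + 1) = false := by simp; omega
        rw [e1, e2]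
        simp only [Bool.and_false, Bool.false_and, Bool.false_or]
        have hlo : 1 ≤ j - (k + 1) := by omega
        rcases hp : pvPw n 0 (k + 1) with _ | _
        · simp
        · have : (1 : Nat) < 2 ^ (j - (k + 1)) := by
            calc (1 : Nat) < 2 ^ 1 := by norm_num
            _ ≤ 2 ^ (j - (k + 1)) := Nat.pow_le_pow_right (by norm_num) hlo
          simp [Nat.testBit_eq_false_of_lt this]

-- Python v & 0xFFFFF is v mod 2^20 (also for negative v)
lemma pvBand_mask (v : Int) : PySem.Int.band v 1048575 = v % 1048576 := by
  unfold PySem.Int.band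
  by_cases hv : 0 ≤ v
  · simp only [hv, if_true]
    rw [if_pos (by norm_num)]
    have h1 : (1048575 : Int).toNat = 2 ^ 20 - 1 := by decide
    rw [h1, Nat.and_two_pow_sub_one_eq_mod]
    have h2 : ((v.toNat % 2 ^ 20 : Nat) : Int) = (v.toNat : Int) % (2 ^ 20 : Nat) := by
      push_cast; ring_nf
    rw [h2, Int.toNat_of_nonneg hv]
    norm_num
  · simp only [hv, if_false]
    rw [if_pos (by norm_num)]
    have h1 : (1048575 : Int).toNat = 2 ^ 20 - 1 := by decide
    rw [h1, Nat.and_comm, Nat.and_two_pow_sub_one_eq_mod]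
    have ha : 0 ≤ -v - 1 := by omega
    have hm : (-v - 1).toNat % 2 ^ 20 < 2 ^ 20 := Nat.mod_lt _ (by norm_num)
    have hc : ((-v - 1).toNat : Int) = -v - 1 := Int.toNat_of_nonneg ha
    have hcast : (((2 ^ 20 - 1 - (-v - 1).toNat % 2 ^ 20 : Nat)) : Int)
        = (2 ^ 20 - 1 : Int) - (((-v - 1).toNat % 2 ^ 20 : Nat) : Int) := by
      omega
    rw [hcast]
    have hmodc : (((-v - 1).toNat % 2 ^ 20 : Nat) : Int) = ((-v - 1).toNat : Int) % (2 ^ 20 : Int) := by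
      push_cast; ring_nf
    rw [hmodc, hc]
    omega

-- bit k of v (two's complement) equals bit k of (v mod 2^20).toNat, for k < 20,
-- read off as A reads it: ((v >> k) & 1)
lemma pvBit_shift (v : Int) (k : Nat) (hk : k < 20) :
    PySem.Int.band (v >>> k) 1
      = (if ((v % 1048576).toNat).testBit k then (1 : Int) else 0) := by
  rw [PySem.Int.band_one, PySem.Int.mod_eq_emod_of_pos (by norm_num)]
  rw [Int.shiftRight_eq_div_pow]
  set n : Nat := (v % 1048576).toNat with hn
  have hnn : (n : Int) = v % 1048576 := by
    rw [hn]; exact Int.toNat_of_nonneg (Int.emod_nonneg v (by norm_num))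
  have hv : v = (n : Int) + (v / 1048576) * 1048576 := by
    rw [hnn]; have := Int.ediv_add_emod v 1048576; omega
  have hpow : (1048576 : Int) = (2 ^ k : Nat) * (2 * 2 ^ (19 - k) : Nat) := by
    push_cast
    have : (2 : Int) ^ k * (2 * 2 ^ (19 - k)) = 2 ^ (k + (19 - k) + 1) := by
      rw [pow_add, pow_add]; ring
    rw [this]
    have : k + (19 - k) + 1 = 20 := by omega
    rw [this]; norm_num
  have hv2 : v = (n : Int)
      + (v / 1048576 * ((2 * 2 ^ (19 - k) : Nat) : Int)) * ((2 ^ k : Nat) : Int) := by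
    rw [show (v / 1048576 * ((2 * 2 ^ (19 - k) : Nat) : Int)) * ((2 ^ k : Nat) : Int)
        = v / 1048576 * (((2 ^ k : Nat) : Int) * ((2 * 2 ^ (19 - k) : Nat) : Int)) by ring,
      ← hpow]
    exact hv
  have hdiv : v / ((2 ^ k : Nat) : Int)
      = (n : Int) / ((2 ^ k : Nat) : Int) + (v / 1048576) * ((2 * 2 ^ (19 - k) : Nat) : Int) := by
    conv_lhs => rw [hv2]
    exact Int.add_mul_ediv_right _ _ (by positivity)
  rw [hdiv]
  have hnd : (n : Int) / ((2 ^ k : Nat) : Int) = ((n / 2 ^ k : Nat) : Int) := by push_cast; ring_nf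
  rw [hnd]
  have hmod : (((n / 2 ^ k : Nat) : Int) + v / 1048576 * ((2 * 2 ^ (19 - k) : Nat) : Int)) % 2
      = ((n / 2 ^ k : Nat) : Int) % 2 := by
    have : ((2 * 2 ^ (19 - k) : Nat) : Int) = 2 * ((2 ^ (19 - k) : Nat) : Int) := by push_cast; ring
    rw [this, show ((n / 2 ^ k : Nat) : Int) + v / 1048576 * (2 * ((2 ^ (19 - k) : Nat) : Int))
        = ((n / 2 ^ k : Nat) : Int) + 2 * (v / 1048576 * ((2 ^ (19 - k) : Nat) : Int)) by ring]
    exact Int.add_mul_emod_self_left _ _ _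
  rw [hmod]
  have htb : n.testBit k = decide ((n / 2 ^ k) % 2 = 1) := by
    rw [Nat.testBit, Nat.shiftRight_eq_div_pow, Nat.and_comm, Nat.and_one_is_mod]
    rcases Nat.mod_two_eq_zero_or_one (n / 2 ^ k) with h | h <;> simp [h]
  rw [htb]
  rcases Nat.mod_two_eq_zero_or_one (n / 2 ^ k) with h | h
  · rw [h]
    have : ((n / 2 ^ k : Nat) : Int) % 2 = ((n / 2 ^ k % 2 : Nat) : Int) := by push_cast; ring_nf
    rw [this, h]; simp
  · rw [h]
    have : ((n / 2 ^ k : Nat) : Int) % 2 = ((n / 2 ^ k % 2 : Nat) : Int) := by push_cast; ring_nf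
    rw [this, h]; simp

-- loop invariant of A's fold over range(1, k+1)
lemma pvA_inv (v : Int) : ∀ (k : Nat), k ≤ 20 →
    ((PySem.List.pyRange 1 ((k : Int) + 1)).foldl
      (fun (st : Int × Int × Int) (i : Int) =>
        let old_bit := st.1
        let rll_value := st.2.1
        let value := st.2.2
        let new_bit := if PySem.Int.band value 1 = 1 then PySem.Int.bxor 1 old_bit else old_bit
        let value := value >>> (1 : Nat)
        let rll_value := PySem.Int.bor rll_value (new_bit <<< i.toNat)
        (new_bit, rll_value, value))
      (0, 0, v))
    = ((if pvPw ((v % 1048576).toNat) 0 k then (1 : Int) else 0),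
       ((pvRA ((v % 1048576).toNat) k : Nat) : Int),
       v >>> k) := by
  intro k
  induction k with
  | zero =>
    intro _
    rw [show ((0 : Nat) : Int) + 1 = 1 from by norm_num,
      show (PySem.List.pyRange 1 1) = ([] : List Int) from by decide]
    simp [pvPw, pvRA]
  | succ k ih =>
    intro hk
    set n : Nat := (v % 1048576).toNat with hn
    have hk' : k ≤ 20 := by omega
    have hcast : ((k + 1 : Nat) : Int) + 1 = ((k : Int) + 1) + 1 := by push_cast; ring
    rw [hcast, PySem.List.pyRange_one_succ_right (by
      have : (0 : Int) ≤ (k : Int) := by positivity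
      omega)]
    rw [List.foldl_append, ih hk']
    simp only [List.foldl_cons, List.foldl_nil]
    -- evaluate one step of the loop body
    have hbit := pvBit_shift v k (by omega)
    have hold : ((if PySem.Int.band (v >>> k) 1 = 1 then
          PySem.Int.bxor 1 (if pvPw n 0 k then (1:Int) else 0)
        else (if pvPw n 0 k then (1:Int) else 0)))
        = (if pvPw n 0 (k + 1) then (1 : Int) else 0) := by
      rw [hbit]
      have hsucc : pvPw n 0 (k + 1) = xor (pvPw n 0 k) (n.testBit k) := by
        rw [show k + 1 = k + 1 from rfl, pvPw_add n k 0 1]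
        have : 0 + k = k := by omega
        rw [this, pvPw_one]
      rcases hb : n.testBit k with _ | _ <;> rcases hp : pvPw n 0 k with _ | _ <;>
        simp [hb, hp, hsucc]
    have hshift : (v >>> k) >>> (1 : Nat) = v >>> (k + 1) := by
      rw [Int.shiftRight_eq_div_pow, Int.shiftRight_eq_div_pow, Int.shiftRight_eq_div_pow]
      rw [Int.ediv_ediv_eq_ediv_mul (by positivity)]
      congr 1
    have htoNat : ((k : Int) + 1).toNat = k + 1 := by omega
    simp only [hold, htoNat, hshift]
    refine congrArg (fun t => ((if pvPw n 0 (k+1) then (1:Int) else 0), t, v >>> (k+1))) ?_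
    have hsl : (if pvPw n 0 (k + 1) then (1 : Int) else 0) <<< (k + 1)
        = (((if pvPw n 0 (k + 1) then 1 else 0) <<< (k + 1) : Nat) : Int) := by
      rcases hp : pvPw n 0 (k + 1) with _ | _ <;> simp [hp]
    rw [hsl, PySem.Int.bor_natCast]
    rfl

-- A's port computes the Nat-level accumulated value
lemma pvA_eq (v : Int) : rll_encode v = ((pvRA ((v % 1048576).toNat) 20 : Nat) : Int) := by
  unfold rll_encode
  have h := pvA_inv v 20 (by omega)
  norm_num at h
  rw [show (21 : Int) = (20 : Int) + 1 from rfl] at h ⊢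
  rw [h]

-- B's port computes the Nat-level cascade
lemma pvB_eq (v : Int) : rll_encode_alt v
    = ((((pvCascade ((v % 1048576).toNat)) &&& 1048575) <<< 1 : Nat) : Int) := by
  unfold rll_encode_alt
  set n : Nat := (v % 1048576).toNat with hn
  have hnn : PySem.Int.band v 0xFFFFF = (n : Int) := by
    rw [show (0xFFFFF : Int) = 1048575 from rfl, pvBand_mask, hn]
    exact (Int.toNat_of_nonneg (Int.emod_nonneg v (by norm_num))).symm
  rw [hnn]
  simp only [show ∀ (a : Nat) (k : Nat), ((a : Int) <<< k) = ((a <<< k : Nat) : Int) from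
    fun a k => by simp, PySem.Int.bxor_natCast]
  rw [show (0xFFFFF : Int) = ((1048575 : Nat) : Int) from rfl, PySem.Int.band_natCast]
  rfl

-- the two Nat-level values agree bit for bit
lemma pvNat_eq (n : Nat) : pvRA n 20 = ((pvCascade n) &&& 1048575) <<< 1 := by
  apply Nat.eq_of_testBit_eq
  intro j
  rw [pvRA_testBit, Nat.testBit_shiftLeft, Nat.testBit_and]
  rw [show (1048575 : Nat) = 2 ^ 20 - 1 from rfl, Nat.testBit_two_pow_sub_one]
  by_cases h1 : 1 ≤ j
  · have hd : decide (j ≥ 1) = true := by simp; omega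
    rw [hd, Bool.true_and]
    by_cases h2 : j ≤ 20
    · have e1 : decide (j - 1 < 20) = true := by simp; omega
      rw [e1, Bool.and_true, pvCascade_testBit n (j - 1) (by omega)]
      have e2 : j - 1 + 1 = j := by omega
      rw [e2]
      simp [h1, h2]
    · have e1 : decide (j - 1 < 20) = false := by simp; omega
      have e2 : decide (j ≤ 20) = false := by simp; omega
      rw [e1, e2]
      simp
  · have hd : decide (j ≥ 1) = false := by simp; omega
    rw [hd]
    simp

-- ===== VERDICT (by name: the statement is the Claim_ definition above) =====
theorem rll_encode_spec : Claim_equal_rll_encode := by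
  intro v _
  unfold Spec_rll_encode
  rw [pvA_eq, pvB_eq, pvNat_eq]
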